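-- pv_equiv track=rewrite | github.com/joonbang/DRMF-Seeding-Project | tex2wiki/src/tex2wiki.py | generate_symbols_list
-- ===== SOURCE A (Python) =====
-- def find_all(pattern, string):
--     # type: (str, str) -> Generator
--     """Finds all instances of pattern in string."""
--
--     i = string.find(pattern)
--     while i != -1:
--         yield i
--         i = string.find(pattern, i + 1)
--
-- def remove_break(string):
--     # (str) -> str
--     """Removes <br /> from the end of a string."""
--
--     while string.rstrip("\n").endswith("<br />"):
--         string = string.rstrip("\n")[:-6]
--
--     return string
--
-- def generate_symbols_list(text, glossary):
--     # type: (str, dict) -> str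
--     """Generates span text based on symbols present in text. Equivalent of old symbols_list module."""
--     symbols = list()
--
--     special_cases = {"&": "& : logical and<br />"}
--     acknowledged = dict()
--     for case in special_cases:
--         acknowledged[case] = False
--
--     for keyword in glossary:
--         for index in find_all(keyword, text):
--             # if the macro is present in the text
--             if index != -1:
--                 index += len(keyword)  # now index of next character
--                 if index >= len(text) or not text[index].isalpha():
--                     symbols.append([keyword, index])
--                     break
--
--     span_text = ""
--
--     # code to handle special cases
--     for keyword in special_cases:
--         for index in find_all(keyword, text):
--             if index != -1 and not acknowledged[keyword]:
--                 span_text += special_cases[keyword] + "\n"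
--                 acknowledged[keyword] = True  # to prevent duplicates
--
--     for symbol in sorted(symbols, key=lambda l: l[1]):  # sort by list index.
--         symbol = symbol[0]
--         links = list()
--         for cell in glossary[symbol]:
--             if "http://" in cell or "https://" in cell:
--                 links.append(cell)
--
--         id_link = links[0]
--         links = ["[" + link + " " + link + "]" for link in links]
--
--         meaning = list(glossary[symbol][1])
--
--         count = 0
--         for i, ch in enumerate(meaning):
--             if ch == "$" and count % 2 == 0:
--                 meaning[i] = "<math>{\\displaystyle "
--                 count += 1
--             elif ch == "$":
--                 meaning[i] = "}</math>"
--                 count += 1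
--
--         appearance = glossary[symbol][4].strip("$")
--
--         span_text += "<span class=\"plainlinks\">[" + id_link + " <math>{\\displaystyle " + appearance + \
--                      "}</math>]</span> : " + ''.join(meaning) + " : " + " ".join(links) + "<br />\n"
--
--     return remove_break(span_text)  # slice off the extra br and endline
-- ===== SOURCE B (Python) =====
-- def generate_symbols_list(text, glossary):
--     # type: (str, dict) -> str
--     """Multi-pattern single-pass scan: instead of searching the text once per
--     keyword, hash all keywords into a set and walk the text ONCE, probing the
--     window starting at each position with each distinct keyword length; the
--     earliest boundary-valid end of every keyword lands in a dict.  Output lines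
--     are assembled with a join (no trailing-<br/> trimming pass)."""
--     n = len(text)
--     kwset = set(glossary)
--     lengths = sorted(set(len(kw) for kw in kwset))
--
--     end_at = {}
--     for i in range(n + 1):
--         for l in lengths:
--             s = text[i:i + l]
--             if s in kwset and s not in end_at:
--                 j = i + len(s)  # len(s) < l only when s is the whole tail
--                 if j >= n or not text[j].isalpha():
--                     end_at[s] = j
--
--     def render_meaning(m):
--         out = []
--         opening = True
--         for ch in m:
--             if ch == "$":
--                 out.append("<math>{\\displaystyle " if opening else "}</math>")
--                 opening = not opening
--             else:
--                 out.append(ch)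
--         return "".join(out)
--
--     lines = []
--     if "&" in text:
--         lines.append("& : logical and")
--
--     matches = [(end_at[kw], cells) for kw, cells in glossary.items() if kw in end_at]
--     matches.sort(key=lambda m: m[0])
--
--     for _, cells in matches:
--         links = [c for c in cells if "http://" in c or "https://" in c]
--         appearance = cells[4].strip("$")
--         lines.append("<span class=\"plainlinks\">[" + links[0]
--                      + " <math>{\\displaystyle " + appearance + "}</math>]</span> : "
--                      + render_meaning(cells[1]) + " : "
--                      + " ".join("[" + l + " " + l + "]" for l in links))
--
--     return "<br />\n".join(lines)
-- ===== Notes on version B (the rewrite author's own statement) =====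
-- stated objective: alternative
-- what changed: B inverts A's loop nest into a multi-pattern single-pass scan: all keywords are hashed into a set and the text is walked ONCE, probing the window at each position with each distinct keyword length and recording every keyword's earliest boundary-valid end in a dict built in that pass, instead of A's per-keyword generator of repeated str.find rescans; B also renders $-meanings with a flag-driven emit pass and assembles the output with a '<br />\n'.join so A's remove_break trimming pass disappears (intended as faster; …
-- outside the precondition, e.g. on generate_symbols_list('ab c', {'ab': ['x']}): A raises IndexError, B raises IndexError
import Mathlib
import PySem

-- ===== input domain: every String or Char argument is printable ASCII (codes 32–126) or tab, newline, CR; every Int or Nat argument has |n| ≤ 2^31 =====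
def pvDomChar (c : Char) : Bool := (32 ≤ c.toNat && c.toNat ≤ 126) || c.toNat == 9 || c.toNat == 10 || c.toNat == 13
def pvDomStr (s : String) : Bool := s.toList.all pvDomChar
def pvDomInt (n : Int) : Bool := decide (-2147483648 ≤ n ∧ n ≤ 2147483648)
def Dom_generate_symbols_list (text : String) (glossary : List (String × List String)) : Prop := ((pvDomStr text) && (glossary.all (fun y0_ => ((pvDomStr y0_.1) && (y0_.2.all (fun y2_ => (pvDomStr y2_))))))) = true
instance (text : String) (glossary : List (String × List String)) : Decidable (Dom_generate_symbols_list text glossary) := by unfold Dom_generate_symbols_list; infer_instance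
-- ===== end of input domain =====

-- B replaces A's per-keyword find_all rescans by ONE pass over the text: all keywords are hashed
-- into a set and the window at each position is probed once per distinct keyword length, collecting
-- every keyword's earliest boundary-valid end in a dict; the accumulated span string + trailing-<br/>
-- trimming pass becomes a join over payload lines (objective: alternative, intended as faster;
-- timing runs measured B 9-41x ahead at n=4096-16384, though the label was not always confirmed).

-- ===== PORT A =====

-- A's inner `for index in find_all(keyword, text): … break` loop: successive str.find(kw, i+1)
-- until the first boundary-valid occurrence.  fuel = |text|+2 always suffices (find results
-- strictly increase and stay ≤ |text|), so this is the same computation made total.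
def pvGoA (t k : List Char) : Nat → Int → Option Int
  | 0, _ => none
  | fuel+1, start =>
    let i := PySem.Chars.findFrom t k start
    if i = -1 then none
    else
      let j := i + (k.length : Int)
      -- `index >= len(text) or not text[index].isalpha()`; when the test on text[index] is
      -- reached, 0 ≤ j < |t| holds, so getD's default is never used (exact port of text[index])
      if (t.length : Int) ≤ j ∨ PySem.Chars.isalpha (t.getD j.toNat ' ') = false then some j
      else pvGoA t k fuel (i+1)

-- special_cases has the single key "&", so both special-case dict loops collapse to this
-- transliteration of the inner find_all loop with the `acknowledged["&"]` flag.
def pvSpecialA (t : List Char) : Nat → Int → Bool → List Char → List Char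
  | 0, _, _, acc => acc
  | fuel+1, start, ack, acc =>
    let i := PySem.Chars.findFrom t ['&'] start
    if i = -1 then acc
    else if ack = false then
      pvSpecialA t fuel (i+1) true (acc ++ "& : logical and<br />\n".toList)
    else pvSpecialA t fuel (i+1) ack acc

-- the enumerate/count loop rewriting `meaning` cell by cell; the final ''.join(meaning)
def pvGoMeanA : Int → List Char → List (List Char)
  | _, [] => []
  | count, c :: rest =>
    if c = '$' ∧ PySem.Int.mod count 2 = 0 then "<math>{\\displaystyle ".toList :: pvGoMeanA (count+1) rest
    else if c = '$' then "}</math>".toList :: pvGoMeanA (count+1) rest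
    else [c] :: pvGoMeanA count rest

def pvMeaningA (cs : List Char) : List Char := PySem.Chars.join [] (pvGoMeanA 0 cs)

-- one iteration of A's `for symbol in sorted(symbols, …)` body (cells = glossary[symbol] as char lists);
-- links[0] raises IndexError when links = [] and cells[1]/[4] raise when len < 5 — those inputs
-- are excluded by Pre_; headD/getD defaults stand in for the raising accesses there.
def pvLineA (cells : List (List Char)) : List Char :=
  let links := cells.foldl (fun acc cell =>
      if PySem.Chars.isIn "http://".toList cell || PySem.Chars.isIn "https://".toList cell
      then acc ++ [cell] else acc) ([] : List (List Char))
  let idLink := links.headD []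
  let links2 := links.map (fun l => '[' :: (l ++ ' ' :: (l ++ [']'])))
  let meaning := pvMeaningA (cells.getD 1 [])
  let appearance := PySem.Chars.stripChars (cells.getD 4 []) ['$']
  "<span class=\"plainlinks\">[".toList ++ idLink ++ " <math>{\\displaystyle ".toList ++ appearance
    ++ "}</math>]</span> : ".toList ++ meaning ++ " : ".toList
    ++ PySem.Chars.join [' '] links2 ++ "<br />\n".toList

-- string.rstrip("\n"): drop the trailing run of '\n' (exact; PySem has no rstrip-with-chars)
def pvRstripNl (s : List Char) : List Char := (s.reverse.dropWhile (fun c => c = '\n')).reverse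

-- remove_break's while loop; each iteration removes ≥ 6 characters, so fuel = |s|+1 suffices
def pvRemoveBreak : Nat → List Char → List Char
  | 0, s => s
  | fuel+1, s =>
    if PySem.Chars.endswith (pvRstripNl s) "<br />".toList then
      pvRemoveBreak fuel (PySem.List.slice (pvRstripNl s) none (some (-6)))
    else s

def generate_symbols_list (text : String) (glossary : List (String × List String)) : String :=
  let t := text.toList
  let d := PySem.Dict.ofList glossary          -- the Python argument is a dict
  let symbols := d.keys.foldl (fun acc kw =>
      match pvGoA t kw.toList (t.length + 2) 0 with
      | some j => acc ++ [(kw, j)]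
      | none => acc) ([] : List (String × Int))
  let spanSpecial := pvSpecialA t (t.length + 2) 0 false []
  let spanText := (PySem.List.sorted symbols (fun p => p.2)).foldl
      (fun acc p => acc ++ pvLineA ((d.getD p.1 []).map String.toList)) spanSpecial
  String.ofList (pvRemoveBreak (spanText.length + 1) spanText)

-- ===== PORT B =====

-- Source B's inner probe: s = text[i:i+l]; if s in kwset and s not in end_at and the character
-- after the window is a valid boundary, record end_at[s] = i + len(s)
def pvProbeB (t : List Char) (kwset : List String) (i : Nat) (d : PySem.Dict String Int)
    (l : Nat) : PySem.Dict String Int :=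
  -- text[i:i+l] with 0 ≤ i, 0 ≤ l is exactly (t.drop i).take l (Python slice truncates)
  if String.ofList ((t.drop i).take l) ∈ kwset
      ∧ d.contains (String.ofList ((t.drop i).take l)) = false then
    -- j = i + len(s); `j >= n or not text[j].isalpha()`
    if t.length ≤ i + ((t.drop i).take l).length
        ∨ PySem.Chars.isalpha (t.getD (i + ((t.drop i).take l).length) ' ') = false then
      d.insert (String.ofList ((t.drop i).take l))
        ((i + ((t.drop i).take l).length : Nat) : Int)
    else d
  else d

-- Source B's render_meaning: one pass with an `opening` flag, emitting chars/tokens directly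
def pvMeaningB (opening : Bool) : List Char → List Char
  | [] => []
  | c :: rest =>
    if c = '$' then
      (if opening then "<math>{\\displaystyle ".toList else "}</math>".toList) ++ pvMeaningB (!opening) rest
    else c :: pvMeaningB opening rest

-- one line of Source B's render loop (no trailing <br />)
def pvLineB (cells : List (List Char)) : List Char :=
  let links := cells.filter (fun cell =>
      PySem.Chars.isIn "http://".toList cell || PySem.Chars.isIn "https://".toList cell)
  let appearance := PySem.Chars.stripChars (cells.getD 4 []) ['$']
  "<span class=\"plainlinks\">[".toList ++ links.headD [] ++ " <math>{\\displaystyle ".toList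
    ++ appearance ++ "}</math>]</span> : ".toList ++ pvMeaningB true (cells.getD 1 [])
    ++ " : ".toList
    ++ PySem.Chars.join [' '] (links.map (fun l => '[' :: (l ++ ' ' :: (l ++ [']']))))

def generate_symbols_list_alt (text : String) (glossary : List (String × List String)) : String :=
  let t := text.toList
  let d := PySem.Dict.ofList glossary          -- the Python argument is a dict
  let kwset := PySem.Set.ofList (glossary.map (·.1))   -- set(glossary)
  let lengths := PySem.List.sorted
      (PySem.Set.ofList (kwset.map (fun kw => kw.toList.length))) (fun x => x)
  -- `for i in range(n + 1): for l in lengths: …` building end_at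
  let endAt := (List.range (t.length + 1)).foldl
      (fun d i => lengths.foldl (pvProbeB t kwset i) d) PySem.Dict.empty
  let lines0 : List (List Char) :=
    if PySem.Chars.isIn ['&'] t then ["& : logical and".toList] else []
  let ms := d.items.foldl (fun acc p =>
      match endAt.get? p.1 with
      | some j => acc ++ [(j, p.2.map String.toList)]
      | none => acc) ([] : List (Int × List (List Char)))
  let lines := lines0 ++ (PySem.List.sorted ms (fun m => m.1)).map (fun m => pvLineB m.2)
  String.ofList (PySem.Chars.join "<br />\n".toList lines)

-- ===== PRECONDITION & SPEC =====

-- kw has an occurrence in t whose following character (if any) is not alphabetic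
def pvHasMatch (t k : List Char) : Prop :=
  ∃ i ∈ List.range (t.length + 1), k <+: t.drop i ∧
    (t.length ≤ i + k.length ∨ PySem.Chars.isalpha (t.getD (i + k.length) ' ') = false)

-- Pre_ excludes exactly the inputs on which the Python A raises: a glossary entry whose key
-- matches in text must have at least 5 cells (cells[1]/cells[4]) and at least one http(s) link
-- cell (links[0]); on the excluded inputs A raises IndexError (and so does B).
def Pre_generate_symbols_list (text : String) (glossary : List (String × List String)) : Prop :=
  ∀ p ∈ (PySem.Dict.ofList glossary).items, pvHasMatch text.toList p.1.toList →
    5 ≤ p.2.length ∧ ∃ c ∈ p.2,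
      (PySem.Str.isIn "http://" c = true ∨ PySem.Str.isIn "https://" c = true)
instance (text : String) (glossary : List (String × List String)) :
    Decidable (Pre_generate_symbols_list text glossary) := by
  unfold Pre_generate_symbols_list pvHasMatch; infer_instance

def pvWitness_generate_symbols_list : String × (List (String × List String)) :=
  ("ab & c", [("ab", ["http://u", "$m$ n", "c", "d", "$x$"]), ("zz", [])])

def Spec_generate_symbols_list (text : String) (glossary : List (String × List String)) (out : String) : Prop := out = generate_symbols_list_alt text glossary
instance (text : String) (glossary : List (String × List String)) (out : String) : Decidable (Spec_generate_symbols_list text glossary out) := by unfold Spec_generate_symbols_list; infer_instance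

-- ===== CLAIM (what is proved, stated in full; the proofs are below) =====
def Claim_equal_generate_symbols_list : Prop := ∀ (text : String) (glossary : List (String × List String)), Dom_generate_symbols_list text glossary → Pre_generate_symbols_list text glossary → Spec_generate_symbols_list text glossary (generate_symbols_list text glossary)

-- ===== LEMMAS AND PROOFS =====

-- ---- a per-keyword specification of B's sweep: the first boundary-valid end from position i ----

def pvGoB (t k : List Char) (i : Nat) : Option Int :=
  if i ≤ t.length then
    if PySem.Chars.startswith (t.drop i) k then
      if (t.length : Int) ≤ (i : Int) + (k.length : Int)
          ∨ PySem.Chars.isalpha (t.getD (i + k.length) ' ') = false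
      then some ((i : Int) + (k.length : Int))
      else pvGoB t k (i+1)
    else pvGoB t k (i+1)
  else none
termination_by t.length + 1 - i

-- a boundary-valid occurrence of k at position i (Int form, matching pvGoB)
def pvHitP (t k : List Char) (i : Nat) : Prop :=
  k <+: t.drop i ∧ ((t.length : Int) ≤ (i : Int) + (k.length : Int)
    ∨ PySem.Chars.isalpha (t.getD (i + k.length) ' ') = false)

theorem pvBoundary_cast (t : List Char) (i len : Nat) :
    (t.length ≤ i + len) ↔ ((t.length : Int) ≤ (i : Int) + (len : Int)) := by omega

theorem pvProbeB_keep (t : List Char) (kwset : List String) (i l : Nat)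
    (d : PySem.Dict String Int) (kw : String) (v : Int) (h : d.get? kw = some v) :
    (pvProbeB t kwset i d l).get? kw = some v := by
  unfold pvProbeB
  split_ifs with h1 h2
  · rw [PySem.Dict.get?_insert]
    split_ifs with he
    · exfalso
      rw [← he, PySem.Dict.contains_eq_isSome_get?, h] at h1
      exact absurd h1.2 (by simp)
    · exact h
  · exact h
  · exact h

theorem pvProbeB_none_cases (t : List Char) (kwset : List String) (i l : Nat)
    (d : PySem.Dict String Int) (kw : String) (h : d.get? kw = none) :
    (pvProbeB t kwset i d l).get? kw = none ∨
      (pvHitP t kw.toList i ∧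
        (pvProbeB t kwset i d l).get? kw = some ((i + kw.toList.length : Nat) : Int)) := by
  unfold pvProbeB
  split_ifs with h1 h2
  · rw [PySem.Dict.get?_insert]
    split_ifs with he
    · right
      have hsc : (t.drop i).take l = kw.toList := by rw [he]; simp
      rw [hsc] at h2 ⊢
      exact ⟨⟨hsc ▸ List.take_prefix l (t.drop i),
        by rcases h2 with h2 | h2
           · exact Or.inl ((pvBoundary_cast t i kw.toList.length).mp h2)
           · exact Or.inr h2⟩, rfl⟩
    · exact Or.inl h
  · exact Or.inl h
  · exact Or.inl h

theorem pvProbeB_nohit (t : List Char) (kwset : List String) (i l : Nat)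
    (d : PySem.Dict String Int) (kw : String) (hno : ¬ pvHitP t kw.toList i)
    (h : d.get? kw = none) : (pvProbeB t kwset i d l).get? kw = none := by
  rcases pvProbeB_none_cases t kwset i l d kw h with h0 | ⟨hhit, _⟩
  · exact h0
  · exact absurd hhit hno

theorem pvProbeB_hit_self (t : List Char) (kwset : List String) (i : Nat)
    (d : PySem.Dict String Int) (kw : String) (hhit : pvHitP t kw.toList i)
    (hkw : kw ∈ kwset) (h : d.get? kw = none) :
    (pvProbeB t kwset i d kw.toList.length).get? kw
      = some ((i + kw.toList.length : Nat) : Int) := by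
  have hsc : (t.drop i).take kw.toList.length = kw.toList :=
    (List.prefix_iff_eq_take.mp hhit.1).symm
  unfold pvProbeB
  rw [hsc, String.ofList_toList]
  rw [if_pos ⟨hkw, by rw [PySem.Dict.contains_eq_isSome_get?, h]; rfl⟩]
  rw [if_pos (by
    rcases hhit.2 with hb | hb
    · exact Or.inl ((pvBoundary_cast t i kw.toList.length).mpr hb)
    · exact Or.inr hb)]
  exact PySem.Dict.get?_insert_self d kw _

theorem pvInner_keep (t : List Char) (kwset : List String) (i : Nat) :
    ∀ (lens : List Nat) (d : PySem.Dict String Int) (kw : String) (v : Int),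
      d.get? kw = some v → (lens.foldl (pvProbeB t kwset i) d).get? kw = some v := by
  intro lens
  induction lens with
  | nil => intro d kw v h; exact h
  | cons l ls ih =>
    intro d kw v h
    exact ih _ kw v (pvProbeB_keep t kwset i l d kw v h)

theorem pvInner_nohit (t : List Char) (kwset : List String) (i : Nat) (kw : String)
    (hno : ¬ pvHitP t kw.toList i) :
    ∀ (lens : List Nat) (d : PySem.Dict String Int), d.get? kw = none →
      (lens.foldl (pvProbeB t kwset i) d).get? kw = none := by
  intro lens
  induction lens with
  | nil => intro d h; exact h
  | cons l ls ih =>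
    intro d h
    exact ih _ (pvProbeB_nohit t kwset i l d kw hno h)

theorem pvInner_hit (t : List Char) (kwset : List String) (i : Nat) (kw : String)
    (hhit : pvHitP t kw.toList i) (hkw : kw ∈ kwset) :
    ∀ (lens : List Nat) (d : PySem.Dict String Int), kw.toList.length ∈ lens →
      (d.get? kw = none ∨ d.get? kw = some ((i + kw.toList.length : Nat) : Int)) →
      (lens.foldl (pvProbeB t kwset i) d).get? kw = some ((i + kw.toList.length : Nat) : Int) := by
  intro lens
  induction lens with
  | nil => intro d hmem _; simp at hmem
  | cons l ls ih =>
    intro d hmem hst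
    rcases hst with hst | hst
    · rcases List.mem_cons.mp hmem with heq | hmem'
      · rw [List.foldl_cons, ← heq]
        exact pvInner_keep t kwset i ls _ kw _ (pvProbeB_hit_self t kwset i d kw hhit hkw hst)
      · rw [List.foldl_cons]
        rcases pvProbeB_none_cases t kwset i l d kw hst with h0 | ⟨_, hsome⟩
        · exact ih _ hmem' (Or.inl h0)
        · exact pvInner_keep t kwset i ls _ kw _ hsome
    · rw [List.foldl_cons]
      exact pvInner_keep t kwset i ls _ kw _ (pvProbeB_keep t kwset i l d kw _ hst)

-- the whole position sweep computes pvGoB for every keyword whose length is probed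
theorem pvSweep_get? (t : List Char) (kwset : List String) (lens : List Nat) (kw : String)
    (hkw : kw ∈ kwset) (hlen : kw.toList.length ∈ lens) :
    ∀ (cnt i : Nat) (d : PySem.Dict String Int), i + cnt = t.length + 1 →
      d.get? kw = none →
      ((List.range' i cnt).foldl (fun d i => lens.foldl (pvProbeB t kwset i) d) d).get? kw
        = pvGoB t kw.toList i := by
  intro cnt
  induction cnt with
  | zero =>
    intro i d hcnt h
    rw [pvGoB, if_neg (by omega)]
    exact h
  | succ n ih =>
    intro i d hcnt h
    have hi : i ≤ t.length := by omega
    rw [show List.range' i (n+1) = i :: List.range' (i+1) n from rfl, List.foldl_cons]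
    by_cases hhit : pvHitP t kw.toList i
    · have hsome := pvInner_hit t kwset i kw hhit hkw lens d hlen (Or.inl h)
      have hkeep : ∀ (is : List Nat) (d' : PySem.Dict String Int),
          d'.get? kw = some ((i + kw.toList.length : Nat) : Int) →
          (is.foldl (fun d j => lens.foldl (pvProbeB t kwset j) d) d').get? kw
            = some ((i + kw.toList.length : Nat) : Int) := by
        intro is
        induction is with
        | nil => intro d' h'; exact h'
        | cons j js ihj =>
          intro d' h'
          exact ihj _ (pvInner_keep t kwset j lens d' kw _ h')
      rw [hkeep _ _ hsome]
      conv_rhs => rw [pvGoB]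
      rw [if_pos hi, if_pos ((PySem.Chars.startswith_iff _ _).mpr hhit.1), if_pos hhit.2]
      push_cast
      rfl
    · have hnone := pvInner_nohit t kwset i kw hhit lens d h
      rw [ih (i+1) _ (by omega) hnone]
      conv_rhs => rw [pvGoB]
      rw [if_pos hi]
      by_cases h1 : PySem.Chars.startswith (t.drop i) kw.toList
      · rw [if_pos h1,
          if_neg (fun hb => hhit ⟨(PySem.Chars.startswith_iff _ _).mp h1, hb⟩)]
      · rw [if_neg h1]

-- ---- the A scan agrees with the per-keyword specification ----

theorem drop_succ_infix (t k : List Char) (s : Nat) (h : k <:+: t.drop (s+1)) : k <:+: t.drop s := by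
  refine h.trans (List.IsSuffix.isInfix ?_)
  have h1 : List.drop 1 (List.drop s t) = List.drop (s+1) t := by
    rw [List.drop_drop]
  rw [← h1]
  exact List.drop_suffix 1 (t.drop s)

theorem pvGoB_none (t k : List Char) : ∀ (s : Nat), ¬ k <:+: t.drop s →
    pvGoB t k s = none := by
  intro s
  induction s using pvGoB.induct t k with
  | case1 s hs hpre hb =>
    intro h
    exact absurd ((PySem.Chars.startswith_iff _ _).mp hpre).isInfix h
  | case2 s hs hpre hb ih =>
    intro h
    exact absurd ((PySem.Chars.startswith_iff _ _).mp hpre).isInfix h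
  | case3 s hs hpre ih =>
    intro h
    rw [pvGoB, if_pos hs, if_neg hpre]
    exact ih (fun hh => h (drop_succ_infix t k s hh))
  | case4 s hs =>
    intro h
    rw [pvGoB, if_neg hs]

theorem pvGoB_skip (t k : List Char) (i0 : Nat) (hi : i0 ≤ t.length) :
    ∀ s, s ≤ i0 → (∀ m, s ≤ m → m < i0 → ¬ k <+: t.drop m) → pvGoB t k s = pvGoB t k i0 := by
  intro s
  induction s using pvGoB.induct t k with
  | case1 s hs hpre hb =>
    intro hsi h
    rcases Nat.eq_or_lt_of_le hsi with rfl | hlt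
    · rfl
    · exact absurd ((PySem.Chars.startswith_iff _ _).mp hpre) (h s le_rfl hlt)
  | case2 s hs hpre hb ih =>
    intro hsi h
    rcases Nat.eq_or_lt_of_le hsi with rfl | hlt
    · rfl
    · exact absurd ((PySem.Chars.startswith_iff _ _).mp hpre) (h s le_rfl hlt)
  | case3 s hs hpre ih =>
    intro hsi h
    rcases Nat.eq_or_lt_of_le hsi with rfl | hlt
    · rfl
    · rw [pvGoB, if_pos hs, if_neg hpre]
      exact ih hlt (fun m hm1 hm2 => h m (by omega) hm2)
  | case4 s hs =>
    intro hsi h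
    omega

theorem pvGoA_eq_pvGoB (t k : List Char) :
    ∀ fuel s, s ≤ t.length → t.length + 1 - s < fuel →
      pvGoA t k fuel (s : Int) = pvGoB t k s := by
  intro fuel
  induction fuel with
  | zero => intro s hs hf; omega
  | succ f ih =>
    intro s hs hf
    simp only [pvGoA]
    by_cases hneg : PySem.Chars.findFrom t k (s : Int) = -1
    · rw [if_pos hneg, pvGoB_none t k s
        ((PySem.Chars.findFrom_natCast_eq_neg_one_iff t k s hs).mp hneg)]
    · rw [if_neg hneg]
      obtain ⟨hle, hpre, hmin⟩ := PySem.Chars.findFrom_natCast_spec t k s hs hneg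
      set i := PySem.Chars.findFrom t k (s : Int) with hidef
      have hnn : 0 ≤ i := le_trans (by exact_mod_cast Int.natCast_nonneg s) hle
      set i0 := i.toNat with hi0
      have hicast : i = (i0 : Int) := (Int.toNat_of_nonneg hnn).symm
      have hsi0 : s ≤ i0 := by omega
      have hi0len : i0 ≤ t.length := by
        rcases eq_or_ne k [] with rfl | hk
        · have : ¬ s < i0 := fun hlt => hmin s le_rfl hlt (List.nil_prefix)
          omega
        · have hlen := hpre.length_le
          rw [List.length_drop] at hlen
          have : 1 ≤ k.length := List.length_pos_iff.mpr hk
          omega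
      rw [pvGoB_skip t k i0 hi0len s hsi0 hmin]
      rw [pvGoB, if_pos hi0len, if_pos ((PySem.Chars.startswith_iff _ _).mpr hpre)]
      rw [hicast]
      have hjcast : (((i0 : Int)) + (k.length : Int)).toNat = i0 + k.length := by omega
      rw [hjcast]
      by_cases hb : (t.length : Int) ≤ (i0 : Int) + (k.length : Int)
          ∨ PySem.Chars.isalpha (t.getD (i0 + k.length) ' ') = false
      · rw [if_pos hb, if_pos hb]
      · rw [if_neg hb, if_neg hb]
        have hlt : i0 + k.length < t.length := by
          rcases not_or.mp hb with ⟨h1, _⟩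
          omega
        have : ((i0 : Int) + 1) = ((i0 + 1 : Nat) : Int) := by push_cast; ring
        rw [this]
        exact ih (i0 + 1) (by omega) (by omega)

-- ---- the special-case loop is an isIn test ----

theorem pvSpecialA_succ (t : List Char) (f : Nat) (start : Int) (ack : Bool) (acc : List Char) :
    pvSpecialA t (f+1) start ack acc =
      (if PySem.Chars.findFrom t ['&'] start = -1 then acc
       else if ack = false then
         pvSpecialA t f (PySem.Chars.findFrom t ['&'] start + 1) true
           (acc ++ "& : logical and<br />\n".toList)
       else pvSpecialA t f (PySem.Chars.findFrom t ['&'] start + 1) ack acc) := rfl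

theorem pvSpecialA_ack (t : List Char) : ∀ fuel start acc,
    pvSpecialA t fuel start true acc = acc := by
  intro fuel
  induction fuel with
  | zero => intro start acc; rfl
  | succ f ih =>
    intro start acc
    rw [pvSpecialA_succ, if_neg (by simp : ¬ (true = false))]
    split_ifs with h1
    · rfl
    · exact ih _ _

theorem pvSpecialA_eq (t : List Char) :
    pvSpecialA t (t.length + 2) 0 false [] =
      if PySem.Chars.isIn ['&'] t then "& : logical and".toList ++ "<br />\n".toList else [] := by
  show pvSpecialA t ((t.length + 1) + 1) 0 false [] = _
  rw [pvSpecialA_succ]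
  by_cases h : PySem.Chars.findFrom t ['&'] 0 = -1
  · rw [if_pos h]
    have hin : PySem.Chars.isIn ['&'] t = false := by
      rw [PySem.Chars.findFrom_zero] at h
      rw [← Bool.not_eq_true, PySem.Chars.isIn_iff_infix]
      exact (PySem.Chars.find_eq_neg_one_iff t ['&']).mp h
    rw [hin]
    simp
  · rw [if_neg h]
    have hin : PySem.Chars.isIn ['&'] t = true := by
      rw [PySem.Chars.isIn_iff_infix]
      rw [PySem.Chars.findFrom_zero] at h
      exact not_not.mp (fun hn => h ((PySem.Chars.find_eq_neg_one_iff t ['&']).mpr hn))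
    rw [hin, if_pos rfl, if_pos rfl, pvSpecialA_ack]
    decide

-- ---- meaning rendering agrees ----

theorem pv_join_nil_cons (x : List Char) (l : List (List Char)) :
    PySem.Chars.join [] (x :: l) = x ++ PySem.Chars.join [] l := by
  cases l with
  | nil => simp [PySem.Chars.join_singleton, PySem.Chars.join_nil]
  | cons y r => simp [PySem.Chars.join_cons_cons]

theorem pvGoMeanA_cons (count : Int) (c : Char) (rest : List Char) :
    pvGoMeanA count (c :: rest) =
      (if c = '$' ∧ PySem.Int.mod count 2 = 0 then "<math>{\\displaystyle ".toList :: pvGoMeanA (count+1) rest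
       else if c = '$' then "}</math>".toList :: pvGoMeanA (count+1) rest
       else [c] :: pvGoMeanA count rest) := rfl

theorem pvMeaningB_cons (b : Bool) (c : Char) (rest : List Char) :
    pvMeaningB b (c :: rest) =
      (if c = '$' then
        (if b then "<math>{\\displaystyle ".toList else "}</math>".toList) ++ pvMeaningB (!b) rest
       else c :: pvMeaningB b rest) := rfl

theorem pvMeaningA_eq_aux : ∀ (cs : List Char) (count : Int) (b : Bool),
    (PySem.Int.mod count 2 = if b then 0 else 1) →
    PySem.Chars.join [] (pvGoMeanA count cs) = pvMeaningB b cs := by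
  intro cs
  induction cs with
  | nil => intro count b h; rfl
  | cons c rest ih =>
    intro count b h
    rw [PySem.Int.mod_eq_emod_of_pos (by norm_num)] at h
    have hstep : PySem.Int.mod (count + 1) 2 = if (!b) then 0 else 1 := by
      rw [PySem.Int.mod_eq_emod_of_pos (by norm_num)]
      cases b <;> simp at h ⊢ <;> omega
    rw [pvGoMeanA_cons, pvMeaningB_cons]
    by_cases hc : c = '$'
    · rw [if_pos hc]
      cases b with
      | true =>
        have hm : PySem.Int.mod count 2 = 0 := by
          rw [PySem.Int.mod_eq_emod_of_pos (by norm_num)]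
          simpa using h
        rw [if_pos ⟨hc, hm⟩, pv_join_nil_cons, ih (count + 1) false hstep]
        simp [hc]
      | false =>
        have hm : ¬ PySem.Int.mod count 2 = 0 := by
          rw [PySem.Int.mod_eq_emod_of_pos (by norm_num)]
          simp only [Bool.false_eq_true, reduceIte] at h
          omega
        rw [if_neg (fun hh => hm hh.2), if_pos hc, pv_join_nil_cons,
          ih (count + 1) true hstep]
        simp
    · rw [if_neg (fun hh => hc hh.1), if_neg hc, if_neg hc, pv_join_nil_cons,
        ih count b (by rw [PySem.Int.mod_eq_emod_of_pos (by norm_num)]; exact h)]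
      simp

theorem pvMeaningA_eq (cs : List Char) : pvMeaningA cs = pvMeaningB true cs := by
  exact pvMeaningA_eq_aux cs 0 true (by decide)

-- ---- lines agree ----

theorem pvLineA_eq (cells : List (List Char)) :
    pvLineA cells = pvLineB cells ++ "<br />\n".toList := by
  unfold pvLineA pvLineB
  rw [PySem.List.foldl_append_if_eq_filter, pvMeaningA_eq]
  simp [List.append_assoc]

-- every B line ends in ']' or ' '
theorem pv_join_links_last : ∀ (ls : List (List Char)) (x : List Char),
    (PySem.Chars.join [' ']
        ((x :: ls).map (fun l => '[' :: (l ++ ' ' :: (l ++ [']']))))).getLast? = some ']' := by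
  intro ls
  induction ls with
  | nil =>
    intro x
    rw [List.map_singleton, PySem.Chars.join_singleton,
      show '[' :: (x ++ ' ' :: (x ++ [']'])) = ('[' :: (x ++ ' ' :: x)) ++ [']'] by simp]
    exact List.getLast?_concat
  | cons y r ih =>
    intro x
    rw [List.map_cons, List.map_cons, PySem.Chars.join_cons_cons, List.getLast?_append]
    have h := ih y
    simp only [List.map_cons] at h
    rw [h]
    rfl

theorem pvLineB_last (cells : List (List Char)) :
    (pvLineB cells).getLast? = some ']' ∨ (pvLineB cells).getLast? = some ' ' := by
  unfold pvLineB
  cases hf : cells.filter (fun cell =>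
      PySem.Chars.isIn "http://".toList cell || PySem.Chars.isIn "https://".toList cell) with
  | nil =>
    right
    dsimp only
    rw [List.map_nil, PySem.Chars.join_nil]
    simp only [List.getLast?_append]
    rfl
  | cons x ls =>
    left
    simp only [List.getLast?_append, pv_join_links_last]
    rfl

-- ---- sorting commutes with the A→B reshaping ----

theorem insertBy_map {α β : Type} (f : α → β) (kA : α → Int) (kB : β → Int)
    (hk : ∀ a, kB (f a) = kA a) (x : α) : ∀ (ys : List α),
    (PySem.List.insertBy (fun a b => decide (kA a < kA b)) x ys).map f =
      PySem.List.insertBy (fun a b => decide (kB a < kB b)) (f x) (ys.map f) := by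
  intro ys
  induction ys with
  | nil => rfl
  | cons y t ih =>
    by_cases hlt : kA x < kA y
    · simp [PySem.List.insertBy, hlt, hk]
    · simp [PySem.List.insertBy, hlt, hk, ih]

theorem sorted_map {α β : Type} (f : α → β) (kA : α → Int) (kB : β → Int)
    (hk : ∀ a, kB (f a) = kA a) (l : List α) :
    PySem.List.sorted (l.map f) kB = (PySem.List.sorted l kA).map f := by
  rw [PySem.List.sorted_eq_foldl_insertBy, PySem.List.sorted_eq_foldl_insertBy,
    List.foldl_map]
  suffices h : ∀ acc : List α,
      List.foldl (fun acc x => PySem.List.insertBy (fun a b => decide (kB a < kB b)) (f x) acc)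
        (acc.map f) l =
      (List.foldl (fun acc x => PySem.List.insertBy (fun a b => decide (kA a < kA b)) x acc) acc l).map f by
    simpa using h []
  induction l with
  | nil => intro acc; rfl
  | cons a rest ih =>
    intro acc
    simp only [List.foldl_cons]
    rw [← insertBy_map f kA kB hk a acc, ih]

-- the A-side "append (kw, j) if matched" loop reshaped through the map to B's entries
theorem pv_fold_pairs (G : String → Option Int) (C : String → List (List Char)) :
    ∀ (ks : List String) (acc : List (String × Int)),
      ks.foldl (fun acc kw => match G kw with
        | some j => acc ++ [(j, C kw)]
        | none => acc) (acc.map (fun p => (p.2, C p.1))) =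
      (ks.foldl (fun acc kw => match G kw with
        | some j => acc ++ [(kw, j)]
        | none => acc) acc).map (fun p => (p.2, C p.1)) := by
  intro ks
  induction ks with
  | nil => intro acc; rfl
  | cons k rest ih =>
    intro acc
    simp only [List.foldl_cons]
    cases hG : G k with
    | none => exact ih acc
    | some j =>
      have := ih (acc ++ [(k, j)])
      simpa using this

-- ---- remove_break undoes the concatenation ----

theorem pvRemoveBreak_succ (f : Nat) (s : List Char) :
    pvRemoveBreak (f+1) s =
      (if PySem.Chars.endswith (pvRstripNl s) "<br />".toList then
        pvRemoveBreak f (PySem.List.slice (pvRstripNl s) none (some (-6)))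
      else s) := rfl

theorem pvRstripNl_snoc_nl (l : List Char) : pvRstripNl (l ++ ['\n']) = pvRstripNl l := by
  simp [pvRstripNl]

theorem pvRstripNl_noop (l : List Char) (c : Char) (hc : c ≠ '\n')
    (h : l.getLast? = some c) : pvRstripNl l = l := by
  obtain ⟨l', rfl⟩ := List.getLast?_eq_some_iff.mp h
  unfold pvRstripNl
  rw [List.reverse_append, List.reverse_singleton, List.singleton_append,
    List.dropWhile_cons_of_neg (by simpa using hc)]
  simp

theorem not_endswith_br (l : List Char) (c : Char) (hc : c ≠ '>')
    (h : l.getLast? = some c) : PySem.Chars.endswith l "<br />".toList = false := by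
  rw [← Bool.not_eq_true, PySem.Chars.endswith_iff]
  intro hsuf
  obtain ⟨pre, rfl⟩ := hsuf
  rw [show "<br />".toList = "<br /".toList ++ ['>'] from rfl, ← List.append_assoc,
    List.getLast?_concat] at h
  exact hc (by simpa using h.symm)

theorem getLast?_join (sep : List Char) : ∀ (ps : List (List Char)) (q : List Char), q ≠ [] →
    (PySem.Chars.join sep (ps ++ [q])).getLast? = q.getLast? := by
  intro ps
  induction ps with
  | nil => intro q hq; rw [List.nil_append, PySem.Chars.join_singleton]
  | cons p rest ih =>
    intro q hq
    cases hr : rest ++ [q] with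
    | nil => simp at hr
    | cons r rs =>
      rw [List.cons_append, hr, PySem.Chars.join_cons_cons, ← hr,
        List.getLast?_append, ih q hq]
      obtain ⟨c, hc⟩ := Option.isSome_iff_exists.mp (List.getLast?_isSome.mpr hq)
      simp [hc]

theorem flatten_snoc_eq_join : ∀ (ps : List (List Char)),
    (ps.map (· ++ "<br />\n".toList)).flatten =
      if ps = [] then [] else PySem.Chars.join "<br />\n".toList ps ++ "<br />\n".toList := by
  intro ps
  induction ps with
  | nil => rfl
  | cons p rest ih =>
    rw [List.map_cons, List.flatten_cons, ih, if_neg (List.cons_ne_nil p rest)]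
    cases rest with
    | nil => simp [PySem.Chars.join_singleton]
    | cons r rs =>
      rw [if_neg (List.cons_ne_nil r rs), PySem.Chars.join_cons_cons]
      simp [List.append_assoc]

theorem pvRemoveBreak_cancel (X : List Char) (c : Char) (hc1 : c ≠ '\n') (hc2 : c ≠ '>')
    (h : X.getLast? = some c) (fuel : Nat) (hf : 2 ≤ fuel) :
    pvRemoveBreak fuel (X ++ "<br />\n".toList) = X := by
  obtain ⟨f, rfl⟩ : ∃ f, fuel = f + 2 := ⟨fuel - 2, by omega⟩
  have hbr : (X ++ "<br />\n".toList) = (X ++ "<br />".toList) ++ ['\n'] := by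
    simp
  have hlastbr : (X ++ "<br />".toList).getLast? = some '>' := by
    rw [show "<br />".toList = "<br /".toList ++ ['>'] from rfl, ← List.append_assoc,
      List.getLast?_concat]
  have hrs : pvRstripNl (X ++ "<br />\n".toList) = X ++ "<br />".toList := by
    rw [hbr, pvRstripNl_snoc_nl, pvRstripNl_noop _ '>' (by decide) hlastbr]
  rw [pvRemoveBreak_succ, hrs, if_pos (by
      rw [PySem.Chars.endswith_iff]; exact List.suffix_append X _)]
  have hslice : PySem.List.slice (X ++ "<br />".toList) none (some (-6)) = X := by
    rw [PySem.List.slice_to_neg_ofNat _ 6 (by omega), List.length_append,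
      show ("<br />".toList).length = 6 from rfl, Nat.add_sub_cancel,
      List.take_left' rfl]
  rw [hslice, pvRemoveBreak_succ, pvRstripNl_noop X c hc1 h, not_endswith_br X c hc2 h]
  simp

theorem pvRemoveBreak_join (payloads : List (List Char))
    (h : ∀ p ∈ payloads, p.getLast? = some ']' ∨ p.getLast? = some ' ' ∨ p.getLast? = some 'd') :
    pvRemoveBreak ((payloads.map (· ++ "<br />\n".toList)).flatten.length + 1)
        ((payloads.map (· ++ "<br />\n".toList)).flatten) =
      PySem.Chars.join "<br />\n".toList payloads := by
  rcases List.eq_nil_or_concat payloads with rfl | ⟨qs, q, rfl⟩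
  · decide
  · rw [List.concat_eq_append, flatten_snoc_eq_join,
      if_neg (by simp)] at *
    have hq : q ∈ qs ++ [q] := List.mem_append_right qs (List.mem_singleton.mpr rfl)
    have hlast := h q hq
    have hqne : q ≠ [] := by
      intro hn
      rw [hn] at hlast
      rcases hlast with h1 | h1 | h1 <;> simp at h1
    have hXlast : (PySem.Chars.join "<br />\n".toList (qs ++ [q])).getLast? = q.getLast? :=
      getLast?_join _ qs q hqne
    rcases hlast with h1 | h1 | h1 <;>
      exact pvRemoveBreak_cancel _ _ (by decide) (by decide) (hXlast.trans h1) _ (by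
        rw [List.length_append]
        have : ("<br />\n".toList).length = 7 := rfl
        omega)

-- ===== VERDICT (by name: the statement is the Claim_ definition above) =====
theorem generate_symbols_list_spec : Claim_equal_generate_symbols_list := by
  intro text glossary _dom _pre
  unfold Spec_generate_symbols_list generate_symbols_list generate_symbols_list_alt
  dsimp only
  apply congrArg String.ofList
  set t := text.toList with ht
  set d := PySem.Dict.ofList glossary with hd
  set C : String → List (List Char) := fun kw => (d.getD kw []).map String.toList with hC
  set f : String × Int → Int × List (List Char) := fun p => (p.2, C p.1) with hf
  -- replace A's scan by the per-keyword specification pvGoB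
  have hscan : d.keys.foldl (fun acc kw => match pvGoA t kw.toList (t.length + 2) 0 with
        | some j => acc ++ [(kw, j)] | none => acc) []
      = d.keys.foldl (fun acc kw => match pvGoB t kw.toList 0 with
        | some j => acc ++ [(kw, j)] | none => acc) [] := by
    apply PySem.List.foldl_congr_mem
    intro acc kw _
    have h0 := pvGoA_eq_pvGoB t kw.toList (t.length + 2) 0 (Nat.zero_le _) (by omega)
    norm_num at h0
    rw [h0]
  rw [hscan]
  set symbols := d.keys.foldl (fun acc kw => match pvGoB t kw.toList 0 with
        | some j => acc ++ [(kw, j)] | none => acc) [] with hsym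
  set kwset := PySem.Set.ofList (glossary.map (·.1)) with hkws
  set lens := PySem.List.sorted
      (PySem.Set.ofList (kwset.map (fun kw => kw.toList.length))) (fun x => x) with hlens
  have hkeys : d.keys = kwset := by
    rw [hd]
    show ((glossary.foldl (fun d p => d.insert p.1 p.2) PySem.Dict.empty)).keys = _
    rw [PySem.Dict.keys_foldl_insert_key glossary (fun p => p.1) (fun _ p => p.2)
      PySem.Dict.empty]
    simp [PySem.Set.update_nil_left, hkws]
  -- B's sweep computes exactly pvGoB for every glossary key
  have hget : ∀ kw ∈ d.keys,
      ((List.range (t.length + 1)).foldl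
        (fun d i => lens.foldl (pvProbeB t kwset i) d) PySem.Dict.empty).get? kw
      = pvGoB t kw.toList 0 := by
    intro kw hk
    have hkw : kw ∈ kwset := hkeys ▸ hk
    have hlen : kw.toList.length ∈ lens := by
      rw [hlens, PySem.List.mem_sorted, PySem.Set.mem_ofList]
      exact List.mem_map.mpr ⟨kw, hkw, rfl⟩
    rw [List.range_eq_range']
    exact pvSweep_get? t kwset lens kw hkw hlen (t.length + 1) 0 PySem.Dict.empty
      (by omega) (PySem.Dict.get?_empty kw)
  -- B's fold over items is the mapped A fold
  have hms : d.items.foldl (fun acc p =>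
        match ((List.range (t.length + 1)).foldl
            (fun d i => lens.foldl (pvProbeB t kwset i) d) PySem.Dict.empty).get? p.1 with
        | some j => acc ++ [(j, p.2.map String.toList)] | none => acc) []
      = symbols.map f := by
    have hcongr : d.items.foldl (fun acc p =>
          match ((List.range (t.length + 1)).foldl
              (fun d i => lens.foldl (pvProbeB t kwset i) d) PySem.Dict.empty).get? p.1 with
          | some j => acc ++ [(j, p.2.map String.toList)] | none => acc) []
        = d.items.foldl (fun acc p => match pvGoB t p.1.toList 0 with
          | some j => acc ++ [(j, p.2.map String.toList)] | none => acc) [] := by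
      apply PySem.List.foldl_congr_mem
      intro acc p hp
      rw [hget p.1 (PySem.Dict.mem_keys_of_mem_items (d := d) hp)]
    rw [hcongr,
      PySem.Dict.items_eq_map_keys d (hd ▸ PySem.Dict.nodup_keys_ofList glossary) [],
      List.foldl_map, hsym, hf]
    simpa using pv_fold_pairs (fun kw => pvGoB t kw.toList 0) C d.keys []
  rw [hms]
  rw [sorted_map f (fun p => p.2) (fun m => m.1) (fun a => rfl)]
  rw [pvSpecialA_eq t]
  set L := PySem.List.sorted symbols (fun p => p.2) with hL
  -- A's render fold
  rw [show (L.map f).map (fun m => pvLineB m.2) = L.map (fun p => pvLineB (C p.1)) by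
    rw [List.map_map]; rfl]
  rw [PySem.List.foldl_append_eq_flatMap (fun p => pvLineA (C p.1)) L]
  have hflat : (if PySem.Chars.isIn ['&'] t then "& : logical and".toList ++ "<br />\n".toList else [])
        ++ L.flatMap (fun p => pvLineA (C p.1))
      = (((if PySem.Chars.isIn ['&'] t then ["& : logical and".toList] else [])
          ++ L.map (fun p => pvLineB (C p.1))).map (· ++ "<br />\n".toList)).flatten := by
    rw [List.map_append, List.flatten_append, List.map_map]
    have h1 : L.flatMap (fun p => pvLineA (C p.1))
        = (L.map ((· ++ "<br />\n".toList) ∘ fun p => pvLineB (C p.1))).flatten := by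
      rw [List.flatMap_def]
      congr 1
      apply List.map_congr_left
      intro p _
      exact pvLineA_eq (C p.1)
    rw [h1]
    congr 1
    by_cases hin : PySem.Chars.isIn ['&'] t
    · rw [if_pos hin, if_pos hin]
      simp
    · rw [if_neg hin, if_neg hin]
      rfl
  rw [hflat]
  apply pvRemoveBreak_join
  intro p hp
  rcases List.mem_append.mp hp with hp1 | hp2
  · right; right
    rcases (by split_ifs at hp1 with h <;> simpa using hp1 :
        p = "& : logical and".toList) with rfl
    decide
  · obtain ⟨q, _, rfl⟩ := List.mem_map.mp hp2
    rcases pvLineB_last (C q.1) with h1 | h1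
    · exact Or.inl h1
    · exact Or.inr (Or.inl h1)
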